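-- pv_equiv track=rewrite | github.com/pkgears/python_practicas | raya.py | validar_siguiente
-- ===== SOURCE A (Python) =====
-- def validar_siguiente(tablero, jugador, fila, columna, dir_x, dir_y, contador = 1):
--   try:
--     if tablero[fila][columna] == jugador:
--       contador += 1
--       if contador == 4:
--         return True
--       else:
--         fila = fila + dir_x
--         columna = columna + dir_y
--         return validar_siguiente(tablero, jugador, fila, columna, dir_x, dir_y, contador)
--     else:
--       return False
--   except IndexError:
--     return False
-- ===== SOURCE B (Python) =====
-- def validar_siguiente(tablero, jugador, fila, columna, dir_x, dir_y, contador=1):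
--     for paso in range(4 - contador):
--         try:
--             if tablero[fila + paso * dir_x][columna + paso * dir_y] != jugador:
--                 return False
--         except IndexError:
--             return False
--     return contador < 4
-- ===== Notes on version B (the rewrite author's own statement) =====
-- stated objective: alternative
-- what changed: Replaces A's tail recursion with mutated position by a for-loop over the step index that addresses each cell in closed form (fila + paso*dir_x, columna + paso*dir_y) and finishes with 'return contador < 4'.
import Mathlib
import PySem

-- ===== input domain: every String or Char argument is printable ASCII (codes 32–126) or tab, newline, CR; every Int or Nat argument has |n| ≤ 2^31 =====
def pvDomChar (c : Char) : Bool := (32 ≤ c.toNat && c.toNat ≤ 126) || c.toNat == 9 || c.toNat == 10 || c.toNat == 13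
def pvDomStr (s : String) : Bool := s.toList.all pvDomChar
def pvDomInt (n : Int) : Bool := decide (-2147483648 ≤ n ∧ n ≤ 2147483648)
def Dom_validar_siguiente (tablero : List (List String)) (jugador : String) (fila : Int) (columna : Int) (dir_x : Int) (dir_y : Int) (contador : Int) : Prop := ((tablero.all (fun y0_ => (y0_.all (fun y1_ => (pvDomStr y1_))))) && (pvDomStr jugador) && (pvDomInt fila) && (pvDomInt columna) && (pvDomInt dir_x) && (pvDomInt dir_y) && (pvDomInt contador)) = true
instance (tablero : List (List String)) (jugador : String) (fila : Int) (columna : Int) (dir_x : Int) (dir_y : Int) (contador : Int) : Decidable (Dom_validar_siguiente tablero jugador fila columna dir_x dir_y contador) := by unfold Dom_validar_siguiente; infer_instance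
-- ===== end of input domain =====

-- B replaces A's tail recursion with a for-loop over the step index, addressing each cell in closed form (alternative decomposition; same cost).


-- ===== PORT A =====
-- Literal port of A's recursion. The `if _ : contador < 4` guard only makes the
-- recursion total in Lean: for contador < 4 it is always taken; for contador ≥ 4 the
-- `contador + 1 == 4` test can never succeed again, so Python A returns False whenever
-- it returns at all, which is the value every branch of the port yields there.
def validar_siguiente (tablero : List (List String)) (jugador : String) (fila : Int) (columna : Int) (dir_x : Int) (dir_y : Int) (contador : Int) : Bool :=
  match PySem.List.pyGet? tablero fila with
  | none => false                                   -- IndexError on tablero[fila]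
  | some row =>
    match PySem.List.pyGet? row columna with
    | none => false                                 -- IndexError on row[columna]
    | some cell =>
      if cell == jugador then
        let contador' := contador + 1
        if contador' == 4 then true
        else
          if _ : contador < 4 then
            validar_siguiente tablero jugador (fila + dir_x) (columna + dir_y) dir_x dir_y contador'
          else false                                -- totality guard (see comment above)
      else false
termination_by (4 - contador).toNat
decreasing_by omega

-- ===== PORT B =====
-- Literal port of B's `for paso in range(4 - contador)` loop: pvB_all walks the
-- max(0, 4 - contador) step indices, addressing cell paso in closed form; the early
-- `return False`s are the false branches, and falling out of the loop yields the
-- final `return contador < 4`.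
def pvB_all (tablero : List (List String)) (jugador : String) (fila : Int) (columna : Int) (dir_x : Int) (dir_y : Int) (paso : Int) : Nat → Bool
  | 0 => true
  | Nat.succ k =>
    match PySem.List.pyGet? tablero (fila + paso * dir_x) >>= fun row => PySem.List.pyGet? row (columna + paso * dir_y) with
    | none => false                                 -- IndexError caught → False
    | some cell =>
      if cell != jugador then false
      else pvB_all tablero jugador fila columna dir_x dir_y (paso + 1) k

def validar_siguiente_alt (tablero : List (List String)) (jugador : String) (fila : Int) (columna : Int) (dir_x : Int) (dir_y : Int) (contador : Int) : Bool :=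
  pvB_all tablero jugador fila columna dir_x dir_y 0 (4 - contador).toNat && decide (contador < 4)

-- ===== PRECONDITION & SPEC =====
-- Pre_ excludes exactly the inputs on which Python A never returns: contador > 3 with
-- direction (0, 0) and the addressed cell equal to jugador, where A re-reads the same
-- matching cell forever (the == 4 test is already passed over) and dies with
-- RecursionError; everywhere else A returns normally.
def Pre_validar_siguiente (tablero : List (List String)) (jugador : String) (fila : Int) (columna : Int) (dir_x : Int) (dir_y : Int) (contador : Int) : Prop := ¬ (3 < contador ∧ dir_x = 0 ∧ dir_y = 0 ∧ (PySem.List.pyGet? tablero fila >>= fun row => PySem.List.pyGet? row columna) = some jugador)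
instance (tablero : List (List String)) (jugador : String) (fila : Int) (columna : Int) (dir_x : Int) (dir_y : Int) (contador : Int) : Decidable (Pre_validar_siguiente tablero jugador fila columna dir_x dir_y contador) := by unfold Pre_validar_siguiente; infer_instance
def pvWitness_validar_siguiente : List (List String) × String × Int × Int × Int × Int × Int := ([["x", "x"], ["x", "o"]], "x", 0, 0, 0, 1, 1)
def Spec_validar_siguiente (tablero : List (List String)) (jugador : String) (fila : Int) (columna : Int) (dir_x : Int) (dir_y : Int) (contador : Int) (out : Bool) : Prop := out = validar_siguiente_alt tablero jugador fila columna dir_x dir_y contador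
instance (tablero : List (List String)) (jugador : String) (fila : Int) (columna : Int) (dir_x : Int) (dir_y : Int) (contador : Int) (out : Bool) : Decidable (Spec_validar_siguiente tablero jugador fila columna dir_x dir_y contador out) := by unfold Spec_validar_siguiente; infer_instance

-- ===== CLAIM (what is proved, stated in full; the proofs are below) =====
def Claim_equal_validar_siguiente : Prop := ∀ (tablero : List (List String)) (jugador : String) (fila : Int) (columna : Int) (dir_x : Int) (dir_y : Int) (contador : Int), Dom_validar_siguiente tablero jugador fila columna dir_x dir_y contador → Pre_validar_siguiente tablero jugador fila columna dir_x dir_y contador → Spec_validar_siguiente tablero jugador fila columna dir_x dir_y contador (validar_siguiente tablero jugador fila columna dir_x dir_y contador)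

-- ===== LEMMAS AND PROOFS =====
-- A's recursion, started at the cell addressed by step index `paso`, computes B's
-- remaining-steps scan pvB_all, as long as contador < 4 and k = (4 - contador).toNat.
lemma pvB_all_eq (tablero : List (List String)) (jugador : String) (dir_x dir_y : Int) : ∀ (k : Nat) (fila columna paso c : Int), c < 4 → (4 - c).toNat = k → validar_siguiente tablero jugador (fila + paso * dir_x) (columna + paso * dir_y) dir_x dir_y c = pvB_all tablero jugador fila columna dir_x dir_y paso k := by
  intro k
  induction k with
  | zero => intro _ _ _ c hc hk; omega
  | succ k ih =>
    intro fila columna paso c hc hk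
    rw [validar_siguiente, pvB_all]
    cases h1 : PySem.List.pyGet? tablero (fila + paso * dir_x) with
    | none => simp [h1]
    | some row =>
      cases h2 : PySem.List.pyGet? row (columna + paso * dir_y) with
      | none => simp [h1, h2]
      | some cell =>
        by_cases hcell : cell = jugador
        · by_cases h4 : c + 1 = 4
          · have hk0 : k = 0 := by omega
            simp [h1, h2, hcell, h4, hk0, pvB_all]
          · have e1 : fila + paso * dir_x + dir_x = fila + (paso + 1) * dir_x := by ring
            have e2 : columna + paso * dir_y + dir_y = columna + (paso + 1) * dir_y := by ring
            have hrec := ih fila columna (paso + 1) (c + 1) (by omega) (by omega)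
            simp [h1, h2, hcell, h4, hc, e1, e2, hrec]
        · simp [h1, h2, hcell]

-- ===== VERDICT (by name: the statement is the Claim_ definition above) =====
theorem validar_siguiente_spec : Claim_equal_validar_siguiente := by
  intro tablero jugador fila columna dir_x dir_y contador _ _
  unfold Spec_validar_siguiente validar_siguiente_alt
  by_cases hc : contador < 4
  · have h := pvB_all_eq tablero jugador dir_x dir_y (4 - contador).toNat fila columna 0 contador hc rfl
    rw [show fila + 0 * dir_x = fila by ring, show columna + 0 * dir_y = columna by ring] at h
    simp [h, hc]
  · have h4 : ¬ (contador + 1 = 4) := by omega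
    have h0 : (4 - contador).toNat = 0 := by omega
    rw [validar_siguiente, h0]
    cases h1 : PySem.List.pyGet? tablero fila with
    | none => simp [pvB_all, hc]
    | some row =>
      cases h2 : PySem.List.pyGet? row columna with
      | none => simp [h2, pvB_all, hc]
      | some cell => simp [h2, pvB_all, hc, h4]
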